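-- pv_equiv track=rewrite | github.com/Shriinivas/inkmcp | blender_inkscape_hybrid.py | parse_hybrid_blocks
-- ===== SOURCE A (Python) =====
-- from typing import List, Tuple, Dict, Any
--
-- def parse_hybrid_blocks(code: str) -> List[Tuple[str, str]]:
--     """Parse code into blocks based on magic comments."""
--     lines = code.split('\n')
--     blocks = []
--     current_type = 'local'  # Default to local (Blender)
--     current_lines = []
--
--     for line in lines:
--         stripped = line.strip()
--
--         if stripped == '# @local':
--             if current_lines:
--                 blocks.append((current_type, '\n'.join(current_lines)))
--                 current_lines = []
--             current_type = 'local'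
--         elif stripped == '# @inkscape':
--             if current_lines:
--                 blocks.append((current_type, '\n'.join(current_lines)))
--                 current_lines = []
--             current_type = 'inkscape'
--         else:
--             current_lines.append(line)
--
--     if current_lines:
--         blocks.append((current_type, '\n'.join(current_lines)))
--
--     return blocks
-- ===== SOURCE B (Python) =====
-- def parse_hybrid_blocks(code):
--     """Parse code into blocks based on magic comments."""
--     return _go('local', code.split('\n'))
--
--
-- def _split_at_marker(lines):
--     """Return (head, tag, rest) around the first marker line, or None."""
--     for i, line in enumerate(lines):
--         s = line.strip()
--         if s == '# @local':
--             return lines[:i], 'local', lines[i + 1:]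
--         if s == '# @inkscape':
--             return lines[:i], 'inkscape', lines[i + 1:]
--     return None
--
--
-- def _go(t, lines):
--     found = _split_at_marker(lines)
--     if found is None:
--         return [(t, '\n'.join(lines))] if lines else []
--     head, tag, rest = found
--     return ([(t, '\n'.join(head))] if head else []) + _go(tag, rest)
-- ===== Notes on version B (the rewrite author's own statement) =====
-- stated objective: alternative
-- what changed: Replaces A's single-pass state machine (current_type/current_lines accumulator with flush logic) by a recursive divide-and-conquer: find the first marker line, slice the list into head/rest, emit the head block and recurse on the remainder with the new tag.
import Mathlib
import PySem

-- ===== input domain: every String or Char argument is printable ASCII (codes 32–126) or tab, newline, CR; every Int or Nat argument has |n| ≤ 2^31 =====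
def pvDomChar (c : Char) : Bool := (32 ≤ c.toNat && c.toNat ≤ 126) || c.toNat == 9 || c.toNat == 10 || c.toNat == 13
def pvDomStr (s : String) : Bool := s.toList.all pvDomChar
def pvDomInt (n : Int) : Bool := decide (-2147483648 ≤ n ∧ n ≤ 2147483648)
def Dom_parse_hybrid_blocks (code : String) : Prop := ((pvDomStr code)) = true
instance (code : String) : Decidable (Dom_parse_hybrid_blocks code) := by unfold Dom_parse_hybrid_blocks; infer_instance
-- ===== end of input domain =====

-- B replaces A's streaming state machine by a recursive split at the first marker line
-- (objective: alternative decomposition, same O(n) cost).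

-- ===== PORT A =====
-- loop body of A (state = (blocks, current_type, current_lines))
def pvStepA (st : List (String × String) × String × List String) (line : String) :
    List (String × String) × String × List String :=
  let stripped := PySem.Str.strip line
  if stripped = "# @local" then
    if st.2.2 ≠ [] then (st.1 ++ [(st.2.1, PySem.Str.join "\n" st.2.2)], "local", [])
    else (st.1, "local", [])
  else if stripped = "# @inkscape" then
    if st.2.2 ≠ [] then (st.1 ++ [(st.2.1, PySem.Str.join "\n" st.2.2)], "inkscape", [])
    else (st.1, "inkscape", [])
  else (st.1, st.2.1, st.2.2 ++ [line])

def parse_hybrid_blocks (code : String) : List (String × String) :=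
  let lines := (PySem.Chars.splitOn code.toList ['\n']).map String.ofList
  let st := lines.foldl pvStepA ([], "local", [])
  if st.2.2 ≠ [] then st.1 ++ [(st.2.1, PySem.Str.join "\n" st.2.2)] else st.1

-- ===== PORT B =====
-- _split_at_marker: scan for the first marker line, return (lines[:i], tag, lines[i+1:])
def pvSplitAtMarker : List String → Option (List String × String × List String)
  | [] => none
  | l :: ls =>
    let s := PySem.Str.strip l
    if s = "# @local" then some ([], "local", ls)
    else if s = "# @inkscape" then some ([], "inkscape", ls)
    else (pvSplitAtMarker ls).map (fun p => (l :: p.1, p.2.1, p.2.2))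

-- termination measure for pvGo: the rest after the first marker is strictly shorter
theorem pvSplit_len : ∀ (lines h : List String) (tg : String) (r : List String),
    pvSplitAtMarker lines = some (h, tg, r) → r.length < lines.length := by
  intro lines
  induction lines with
  | nil => intro h tg r hx; simp [pvSplitAtMarker] at hx
  | cons l ls ih =>
    intro h tg r hx
    by_cases h1 : PySem.Str.strip l = "# @local"
    · simp [pvSplitAtMarker, h1] at hx
      simp [← hx.2.2]
    · by_cases h2 : PySem.Str.strip l = "# @inkscape"
      · simp [pvSplitAtMarker, h2] at hx
        simp [← hx.2.2]
      · cases hs : pvSplitAtMarker ls with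
        | none => simp [pvSplitAtMarker, h1, h2, hs] at hx
        | some p =>
          obtain ⟨p1, tg', r'⟩ := p
          simp [pvSplitAtMarker, h1, h2, hs] at hx
          have hlt := ih p1 tg' r' hs
          obtain ⟨-, -, hr⟩ := hx
          subst hr
          simp only [List.length_cons]
          omega

-- _go: emit the block before the first marker, recurse on the rest with the new tag
def pvGo (t : String) (lines : List String) : List (String × String) :=
  match hx : pvSplitAtMarker lines with
  | none      => if lines ≠ [] then [(t, PySem.Str.join "\n" lines)] else []
  | some (head, tag, rest) =>
      (if head ≠ [] then [(t, PySem.Str.join "\n" head)] else []) ++ pvGo tag rest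
termination_by lines.length
decreasing_by exact pvSplit_len _ _ _ _ hx

def parse_hybrid_blocks_alt (code : String) : List (String × String) :=
  pvGo "local" ((PySem.Chars.splitOn code.toList ['\n']).map String.ofList)

-- ===== PRECONDITION & SPEC =====
def Spec_parse_hybrid_blocks (code : String) (out : List (String × String)) : Prop := out = parse_hybrid_blocks_alt code
instance (code : String) (out : List (String × String)) : Decidable (Spec_parse_hybrid_blocks code out) := by unfold Spec_parse_hybrid_blocks; infer_instance

-- ===== CLAIM (what is proved, stated in full; the proofs are below) =====
def Claim_equal_parse_hybrid_blocks : Prop := ∀ (code : String), Dom_parse_hybrid_blocks code → Spec_parse_hybrid_blocks code (parse_hybrid_blocks code)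

-- ===== LEMMAS AND PROOFS =====

-- a line is "marker-free" when its stripped form is neither magic comment
def pvPlain (l : String) : Prop :=
  PySem.Str.strip l ≠ "# @local" ∧ PySem.Str.strip l ≠ "# @inkscape"

theorem pvSplit_none (cur : List String) (h : ∀ l ∈ cur, pvPlain l) :
    pvSplitAtMarker cur = none := by
  induction cur with
  | nil => rfl
  | cons l ls ih =>
    have hl := h l (by simp)
    simp [pvSplitAtMarker, hl.1, hl.2, ih (fun x hx => h x (by simp [hx]))]

theorem pvSplit_append (cur : List String) (h : ∀ l ∈ cur, pvPlain l) :
    ∀ (line : String) (rest : List String) (tg : String),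
    ((PySem.Str.strip line = "# @local" ∧ tg = "local") ∨
     (PySem.Str.strip line = "# @inkscape" ∧ tg = "inkscape")) →
    pvSplitAtMarker (cur ++ line :: rest) = some (cur, tg, rest) := by
  induction cur with
  | nil =>
    intro line rest tg hm
    rcases hm with ⟨h1, h2⟩ | ⟨h1, h2⟩ <;> simp [pvSplitAtMarker, h1, h2]
  | cons l ls ih =>
    intro line rest tg hm
    have hl := h l (by simp)
    simp [pvSplitAtMarker, hl.1, hl.2,
      ih (fun x hx => h x (by simp [hx])) line rest tg hm]

theorem pvGo_none (t : String) (lines : List String)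
    (h : pvSplitAtMarker lines = none) :
    pvGo t lines = if lines ≠ [] then [(t, PySem.Str.join "\n" lines)] else [] := by
  rw [pvGo]; split <;> simp_all

theorem pvGo_some (t : String) (lines head tg rest)
    (h : pvSplitAtMarker lines = some (head, tg, rest)) :
    pvGo t lines
      = (if head ≠ [] then [(t, PySem.Str.join "\n" head)] else []) ++ pvGo tg rest := by
  rw [pvGo]; split <;> simp_all

-- main loop invariant: A's fold with pending lines `cur` equals B's recursion on cur ++ lines
theorem pvLoop (lines : List String) : ∀ (bs : List (String × String)) (t : String)
    (cur : List String), (∀ l ∈ cur, pvPlain l) →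
    (let st := lines.foldl pvStepA (bs, t, cur);
      if st.2.2 ≠ [] then st.1 ++ [(st.2.1, PySem.Str.join "\n" st.2.2)] else st.1)
    = bs ++ pvGo t (cur ++ lines) := by
  induction lines with
  | nil =>
    intro bs t cur hcur
    rw [List.append_nil, pvGo_none t cur (pvSplit_none cur hcur)]
    by_cases h : cur = [] <;> simp [h]
  | cons line rest ih =>
    intro bs t cur hcur
    by_cases h1 : PySem.Str.strip line = "# @local"
    · have hA : pvStepA (bs, t, cur) line
          = ((if cur ≠ [] then bs ++ [(t, PySem.Str.join "\n" cur)] else bs), "local", []) := by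
        by_cases hc : cur = [] <;> simp [pvStepA, h1, hc]
      have hsplit := pvSplit_append cur hcur line rest "local" (Or.inl ⟨h1, rfl⟩)
      rw [List.foldl_cons, hA,
        ih _ "local" [] (by simp [pvPlain]), pvGo_some t (cur ++ line :: rest) _ _ _ hsplit]
      by_cases hc : cur = [] <;> simp [hc]
    · by_cases h2 : PySem.Str.strip line = "# @inkscape"
      · have hA : pvStepA (bs, t, cur) line
            = ((if cur ≠ [] then bs ++ [(t, PySem.Str.join "\n" cur)] else bs), "inkscape", []) := by
          by_cases hc : cur = [] <;> simp [pvStepA, h2, hc]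
        have hsplit := pvSplit_append cur hcur line rest "inkscape" (Or.inr ⟨h2, rfl⟩)
        rw [List.foldl_cons, hA,
          ih _ "inkscape" [] (by simp [pvPlain]), pvGo_some t (cur ++ line :: rest) _ _ _ hsplit]
        by_cases hc : cur = [] <;> simp [hc]
      · have hA : pvStepA (bs, t, cur) line = (bs, t, cur ++ [line]) := by
          simp [pvStepA, h1, h2]
        have hcur' : ∀ l ∈ cur ++ [line], pvPlain l := by
          intro x hx
          rcases List.mem_append.1 hx with hx | hx
          · exact hcur x hx
          · simp at hx; subst hx; exact ⟨h1, h2⟩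
        rw [List.foldl_cons, hA, ih bs t (cur ++ [line]) hcur']
        simp

-- ===== VERDICT (by name: the statement is the Claim_ definition above) =====
theorem parse_hybrid_blocks_spec : Claim_equal_parse_hybrid_blocks := by
  intro code _
  show parse_hybrid_blocks code = parse_hybrid_blocks_alt code
  have h := pvLoop ((PySem.Chars.splitOn code.toList ['\n']).map String.ofList)
    [] "local" [] (by simp)
  simpa [parse_hybrid_blocks, parse_hybrid_blocks_alt] using h
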